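-- pv_equiv track=rewrite | github.com/vallahrich/quantum-finance-slr | tools/slr_toolkit/query_builder.py | _wrap_arxiv_term
-- ===== SOURCE A (Python) =====
-- def _wrap_arxiv_term(term: str) -> str:
--     """Wrap a single term/phrase with ``ti:`` and ``abs:`` field prefixes.
--
--     Quoted phrases are preserved; individual terms are left bare within the
--     field prefix.  Leading/trailing parentheses from Boolean grouping are
--     preserved outside the field-prefix wrapper.
--
--     Returns ``{leading}(ti:{term} OR abs:{term}){trailing}``.
--     """
--     term = term.strip()
--     if not term:
--         return ""
--     # Strip leading/trailing parentheses (Boolean grouping, not part of term)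
--     leading = ""
--     trailing = ""
--     while term.startswith("("):
--         leading += "("
--         term = term[1:]
--     while term.endswith(")"):
--         trailing += ")"
--         term = term[:-1]
--     term = term.strip()
--     if not term:
--         return leading + trailing
--     return f"{leading}(ti:{term} OR abs:{term}){trailing}"
-- ===== SOURCE B (Python) =====
-- def _wrap_arxiv_term(term: str) -> str:
--     """Wrap a single term/phrase with ti: and abs: field prefixes.
--
--     Instead of repeatedly rebuilding the string (strip, then two
--     paren-peeling loops with slicing, then strip again), this version
--     computes four cut indices over the original string with two pointers
--     and slices exactly once at the end.
--     """
--     i, j = 0, len(term)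
--     # outer whitespace
--     while i < j and term[i].isspace():
--         i += 1
--     while i < j and term[j - 1].isspace():
--         j -= 1
--     if i == j:
--         return ""
--     # boolean-grouping parentheses
--     a = i
--     while a < j and term[a] == '(':
--         a += 1
--     b = j
--     while b > a and term[b - 1] == ')':
--         b -= 1
--     leading = '(' * (a - i)
--     trailing = ')' * (j - b)
--     # inner whitespace
--     while a < b and term[a].isspace():
--         a += 1
--     while a < b and term[b - 1].isspace():
--         b -= 1
--     if a == b:
--         return leading + trailing
--     core = term[a:b]
--     return f"{leading}(ti:{core} OR abs:{core}){trailing}"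
-- ===== Notes on version B (the rewrite author's own statement) =====
-- stated objective: alternative
-- what changed: A performs staged string surgery (strip, two paren-peeling loops that rebuild the string by slicing, strip again); B never builds intermediate strings: it computes four cut indices over the original string with two-pointer index arithmetic and slices exactly once at the end.
import Mathlib
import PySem

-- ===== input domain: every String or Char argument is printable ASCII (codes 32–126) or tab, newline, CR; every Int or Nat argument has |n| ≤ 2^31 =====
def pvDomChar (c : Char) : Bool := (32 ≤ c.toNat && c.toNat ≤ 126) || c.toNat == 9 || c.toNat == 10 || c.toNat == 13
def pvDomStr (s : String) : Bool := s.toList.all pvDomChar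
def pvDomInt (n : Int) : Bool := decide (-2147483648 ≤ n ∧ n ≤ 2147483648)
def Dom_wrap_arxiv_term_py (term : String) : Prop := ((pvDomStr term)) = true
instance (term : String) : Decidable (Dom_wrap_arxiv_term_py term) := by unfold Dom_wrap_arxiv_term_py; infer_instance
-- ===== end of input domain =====

-- B replaces A's staged string surgery (strip, two paren-peeling loops that rebuild the
-- string by slicing, strip again) by two-pointer index arithmetic over the original
-- string with a single final slice (alternative decomposition; same cost).

-- ===== PORT A =====
-- while term.startswith("("): leading += "("; term = term[1:]   (term[1:] = drop 1, index nonneg)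
def pvALeadLoop (leading term : List Char) : List Char × List Char :=
  if PySem.Chars.startswith term ['('] then
    pvALeadLoop (leading ++ ['(']) (term.drop 1)
  else (leading, term)
termination_by term.length
decreasing_by
  rename_i h
  rcases (PySem.Chars.startswith_iff _ _).1 h with ⟨t, ht⟩
  cases term with
  | nil => simp at ht
  | cons c cs => simp

-- while term.endswith(")"): trailing += ")"; term = term[:-1]   (term[:-1] = dropLast)
def pvATrailLoop (trailing term : List Char) : List Char × List Char :=
  if PySem.Chars.endswith term [')'] then
    pvATrailLoop (trailing ++ [')']) term.dropLast
  else (trailing, term)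
termination_by term.length
decreasing_by
  rename_i h
  rcases (PySem.Chars.endswith_iff _ _).1 h with ⟨t, ht⟩
  cases term with
  | nil => simp at ht
  | cons c cs => simp [List.length_dropLast]

def wrap_arxiv_term_py (term : String) : String :=
  let t := PySem.Chars.strip term.toList
  if t = [] then ""
  else
    let p1 := pvALeadLoop [] t
    let p2 := pvATrailLoop [] p1.2
    let t3 := PySem.Chars.strip p2.2
    if t3 = [] then String.ofList (p1.1 ++ p2.1)
    else String.ofList (p1.1 ++ "(ti:".toList ++ t3 ++ " OR abs:".toList ++ t3 ++ [')'] ++ p2.1)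

-- ===== PORT B =====
-- 'while x < j and pred(term[x]): x += 1' — index moves right while pred holds on the
-- current char (x < j ≤ len keeps term[x] in range, so getD's default is never read).
def pvScanL (p : Char → Bool) (l : List Char) (j : Nat) (i : Nat) : Nat :=
  if h : i < j ∧ p (l.getD i ' ') then pvScanL p l j (i + 1) else i
termination_by j - i
decreasing_by omega

-- 'while b > a and pred(term[b-1]): b -= 1'
def pvScanR (p : Char → Bool) (l : List Char) (a : Nat) (b : Nat) : Nat :=
  if h : a < b ∧ p (l.getD (b - 1) ' ') then pvScanR p l a (b - 1) else b
termination_by b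
decreasing_by omega

def wrap_arxiv_term_py_alt (term : String) : String :=
  let l := term.toList
  let i := pvScanL PySem.Chars.isspace l l.length 0
  let j := pvScanR PySem.Chars.isspace l i l.length
  if i = j then ""
  else
    let a := pvScanL (· == '(') l j i
    let b := pvScanR (· == ')') l a j
    let leading := List.replicate (a - i) '('
    let trailing := List.replicate (j - b) ')'
    let a2 := pvScanL PySem.Chars.isspace l b a
    let b2 := pvScanR PySem.Chars.isspace l a2 b
    if a2 = b2 then String.ofList (leading ++ trailing)
    else
      -- term[a:b] with 0 ≤ a2 ≤ b2 ≤ len(term): exact as take-then-drop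
      let core := (l.take b2).drop a2
      String.ofList (leading ++ "(ti:".toList ++ core ++ " OR abs:".toList ++ core ++ [')'] ++ trailing)

-- ===== PRECONDITION & SPEC =====
def Spec_wrap_arxiv_term_py (term : String) (out : String) : Prop := out = wrap_arxiv_term_py_alt term
instance (term : String) (out : String) : Decidable (Spec_wrap_arxiv_term_py term out) := by unfold Spec_wrap_arxiv_term_py; infer_instance

-- ===== CLAIM (what is proved, stated in full; the proofs are below) =====
def Claim_equal_wrap_arxiv_term_py : Prop := ∀ (term : String), Dom_wrap_arxiv_term_py term → Spec_wrap_arxiv_term_py term (wrap_arxiv_term_py term)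

-- ===== LEMMAS AND PROOFS =====

-- A's leading-paren loop is the takeWhile/dropWhile split.
theorem pvALeadLoop_eq (t : List Char) : ∀ leading,
    pvALeadLoop leading t = (leading ++ t.takeWhile (· == '('), t.dropWhile (· == '(')) := by
  induction t with
  | nil => intro leading; rw [pvALeadLoop]; simp [PySem.Chars.startswith]
  | cons c cs ih =>
    intro leading
    rw [pvALeadLoop]
    by_cases hc : c = '('
    · subst hc
      have hs : PySem.Chars.startswith ('(' :: cs) ['('] = true :=
        (PySem.Chars.startswith_iff _ _).2 ⟨cs, rfl⟩
      simp [hs, ih]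
    · have hs : PySem.Chars.startswith (c :: cs) ['('] = false := by
        rw [← Bool.not_eq_true, PySem.Chars.startswith_iff]
        rintro ⟨tl, htl⟩
        exact hc (by injection htl with h1 _; exact h1.symm)
      simp [hs, hc]

-- A's trailing-paren loop, read from the reversed string.
theorem pvATrailLoop_eq (rt : List Char) : ∀ trailing,
    pvATrailLoop trailing rt.reverse
      = (trailing ++ rt.takeWhile (· == ')'), (rt.dropWhile (· == ')')).reverse) := by
  induction rt with
  | nil => intro trailing; rw [pvATrailLoop]; simp [PySem.Chars.endswith]
  | cons c cs ih =>
    intro trailing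
    rw [show (c :: cs).reverse = cs.reverse ++ [c] from by simp]
    rw [pvATrailLoop]
    by_cases hc : c = ')'
    · subst hc
      have hs : PySem.Chars.endswith (cs.reverse ++ [')']) [')'] = true :=
        (PySem.Chars.endswith_iff _ _).2 ⟨cs.reverse, rfl⟩
      simp only [hs, if_true, List.dropLast_concat]
      simp [ih]
    · have hs : PySem.Chars.endswith (cs.reverse ++ [c]) [')'] = false := by
        rw [← Bool.not_eq_true, PySem.Chars.endswith_iff]
        rintro ⟨tl, htl⟩
        have hcr : ')' = c := by
          have := congrArg (fun l => l.getLast?) htl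
          simpa using this
        exact hc hcr.symm
      simp [hs, hc]

-- a takeWhile of an equality test is a replicate of its own length
theorem takeWhile_eq_replicate (a : Char) (t : List Char) :
    t.takeWhile (· == a) = List.replicate (t.takeWhile (· == a)).length a := by
  induction t with
  | nil => simp
  | cons c cs ih =>
    by_cases hc : c = a
    · subst hc; simpa [List.takeWhile_cons, List.replicate_succ] using ih
    · simp [hc]

theorem dropWhile_eq_drop (p : Char → Bool) (l : List Char) :
    l.dropWhile p = l.drop (l.takeWhile p).length := by
  induction l with
  | nil => simp
  | cons c cs ih => by_cases h : p c <;> simp [h, ih]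

theorem rev_drop_rev (w : List Char) (d : Nat) :
    (w.reverse.drop d).reverse = w.take (w.length - d) := by
  rw [List.reverse_drop]; simp

-- B's left-moving index loop computes i plus the takeWhile-length of the window term[i:j].
theorem pvScanL_spec (p : Char → Bool) (l : List Char) :
    ∀ n i j, j - i ≤ n → i ≤ j → j ≤ l.length →
    pvScanL p l j i = i + (((l.drop i).take (j - i)).takeWhile p).length := by
  intro n
  induction n with
  | zero =>
    intro i j h hij hj
    have : i = j := by omega
    subst this
    rw [pvScanL]
    simp
  | succ n ih =>
    intro i j h hij hj
    rw [pvScanL]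
    by_cases hc : i < j ∧ p (l.getD i ' ')
    · have hil : i < l.length := by omega
      have hget : l.getD i ' ' = l[i] := List.getD_eq_getElem l ' ' hil
      have hwin : (l.drop i).take (j - i) = l[i] :: (l.drop (i + 1)).take (j - (i + 1)) := by
        rw [show j - i = (j - (i + 1)) + 1 by omega, List.drop_eq_getElem_cons hil,
          List.take_succ_cons]
      rw [dif_pos hc, ih (i + 1) j (by omega) (by omega) hj, hwin]
      rw [List.takeWhile_cons, if_pos (hget ▸ hc.2)]
      simp; omega
    · rw [dif_neg hc]
      by_cases hij' : i < j
      · have hil : i < l.length := by omega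
        have hget : l.getD i ' ' = l[i] := List.getD_eq_getElem l ' ' hil
        have hp : p l[i] = false := by
          cases hpv : p l[i]
          · rfl
          · exact absurd ⟨hij', by rw [hget]; exact hpv⟩ hc
        have hwin : (l.drop i).take (j - i) = l[i] :: (l.drop (i + 1)).take (j - (i + 1)) := by
          rw [show j - i = (j - (i + 1)) + 1 by omega, List.drop_eq_getElem_cons hil,
            List.take_succ_cons]
        rw [hwin, List.takeWhile_cons, if_neg (by simp [hp])]
        simp
      · have : i = j := by omega
        subst this
        simp

-- B's right-moving index loop computes b minus the takeWhile-length of the reversed window.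
theorem pvScanR_spec (p : Char → Bool) (l : List Char) :
    ∀ n a b, b - a ≤ n → a ≤ b → b ≤ l.length →
    pvScanR p l a b = b - ((((l.drop a).take (b - a)).reverse).takeWhile p).length := by
  intro n
  induction n with
  | zero =>
    intro a b h hab hb
    have : a = b := by omega
    subst this
    rw [pvScanR]
    simp
  | succ n ih =>
    intro a b h hab hb
    rw [pvScanR]
    by_cases hc : a < b ∧ p (l.getD (b - 1) ' ')
    · have hbl : b - 1 < l.length := by omega
      have hget : l.getD (b - 1) ' ' = l[b - 1] := List.getD_eq_getElem l ' ' hbl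
      have hidx : (l.drop a)[b - 1 - a]? = some l[b - 1] := by
        rw [List.getElem?_drop]
        rw [List.getElem?_eq_getElem (by omega)]
        congr 1
        congr 1
        omega
      have hwin : (l.drop a).take (b - a)
          = (l.drop a).take (b - 1 - a) ++ [l[b - 1]] := by
        rw [show b - a = (b - 1 - a) + 1 by omega, List.take_succ, hidx]
        rfl
      have hlen : (((l.drop a).take (b - 1 - a)).reverse.takeWhile p).length ≤ b - 1 - a := by
        calc (((l.drop a).take (b - 1 - a)).reverse.takeWhile p).length
            ≤ ((l.drop a).take (b - 1 - a)).reverse.length := (List.takeWhile_sublist p).length_le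
          _ ≤ b - 1 - a := by simp
      rw [dif_pos hc, ih a (b - 1) (by omega) (by omega) (by omega), hwin]
      rw [List.reverse_append]
      simp only [List.reverse_cons, List.reverse_nil, List.nil_append, List.singleton_append]
      rw [List.takeWhile_cons, if_pos (hget ▸ hc.2)]
      simp; omega
    · rw [dif_neg hc]
      by_cases hab' : a < b
      · have hbl : b - 1 < l.length := by omega
        have hget : l.getD (b - 1) ' ' = l[b - 1] := List.getD_eq_getElem l ' ' hbl
        have hp : p l[b - 1] = false := by
          cases hpv : p l[b - 1]
          · rfl
          · exact absurd ⟨hab', by rw [hget]; exact hpv⟩ hc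
        have hidx : (l.drop a)[b - 1 - a]? = some l[b - 1] := by
          rw [List.getElem?_drop]
          rw [List.getElem?_eq_getElem (by omega)]
          congr 1
          congr 1
          omega
        have hwin : (l.drop a).take (b - a)
            = (l.drop a).take (b - 1 - a) ++ [l[b - 1]] := by
          rw [show b - a = (b - 1 - a) + 1 by omega, List.take_succ, hidx]
          rfl
        rw [hwin, List.reverse_append]
        simp only [List.reverse_cons, List.reverse_nil, List.nil_append, List.singleton_append]
        rw [List.takeWhile_cons, if_neg (by simp [hp])]
        simp
      · have : a = b := by omega
        subst this
        simp

-- window shifts: moving the left cut right by d, moving the right cut left by d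
theorem winL (l : List Char) (x y d : Nat) :
    (l.drop (x + d)).take (y - (x + d)) = ((l.drop x).take (y - x)).drop d := by
  rw [List.drop_take, List.drop_drop]
  congr 1
  omega

theorem winR (l : List Char) (x y d : Nat) :
    (l.drop x).take ((y - d) - x) = ((l.drop x).take (y - x)).take ((y - x) - d) := by
  rw [List.take_take, Nat.min_eq_left (Nat.sub_le _ _)]
  congr 1
  omega

-- ===== VERDICT (by name: the statement is the Claim_ definition above) =====
set_option maxHeartbeats 1600000 in
theorem wrap_arxiv_term_py_spec : Claim_equal_wrap_arxiv_term_py := by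
  intro term _
  unfold Spec_wrap_arxiv_term_py wrap_arxiv_term_py wrap_arxiv_term_py_alt
  simp only []
  set l := term.toList with hl
  have hTWle : ∀ (p : Char → Bool) (w : List Char), (w.takeWhile p).length ≤ w.length :=
    fun p w => (List.takeWhile_sublist p).length_le
  -- outer strip: B's first two index loops compute the strip cut points
  have h_i : pvScanL PySem.Chars.isspace l l.length 0 = (l.takeWhile PySem.Chars.isspace).length := by
    rw [pvScanL_spec PySem.Chars.isspace l l.length 0 l.length le_rfl (Nat.zero_le _) le_rfl]
    simp
  rw [h_i]
  set i := (l.takeWhile PySem.Chars.isspace).length with hi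
  have hil : i ≤ l.length := hTWle _ l
  have hm : l.drop i = l.dropWhile PySem.Chars.isspace := (dropWhile_eq_drop _ l).symm
  set m := l.dropWhile PySem.Chars.isspace with hmd
  have hml : i + m.length = l.length := by
    have := congrArg List.length (List.takeWhile_append_dropWhile (p := PySem.Chars.isspace) (l := l))
    simp only [List.length_append] at this
    omega
  have h_j : pvScanR PySem.Chars.isspace l i l.length
      = l.length - (m.reverse.takeWhile PySem.Chars.isspace).length := by
    rw [pvScanR_spec PySem.Chars.isspace l (l.length - i) i l.length le_rfl hil le_rfl]
    rw [List.take_of_length_le (by simp), hm]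
  rw [h_j]
  set k := (m.reverse.takeWhile PySem.Chars.isspace).length with hk
  have hkm : k ≤ m.length := by
    have := hTWle PySem.Chars.isspace m.reverse
    simpa using this
  have ht' : PySem.Chars.strip l = m.take (m.length - k) := by
    show ((l.dropWhile PySem.Chars.isspace).reverse.dropWhile PySem.Chars.isspace).reverse = _
    rw [← hmd, dropWhile_eq_drop PySem.Chars.isspace m.reverse, ← hk, rev_drop_rev]
  set t := PySem.Chars.strip l with htd
  have htlen : t.length = m.length - k := by
    rw [ht']
    simp
  -- the stripped string is the [i, l.length - k) window
  have hwin_t : (l.drop i).take ((l.length - k) - i) = t := by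
    rw [hm, show (l.length - k) - i = m.length - k from by omega, ht']
  by_cases h0 : t = []
  · have hiz : i = l.length - k := by
      have : t.length = 0 := by rw [h0]; rfl
      omega
    rw [if_pos h0, if_pos hiz]
  · have hne : ¬ (i = l.length - k) := by
      intro he
      apply h0
      have : t.length = 0 := by omega
      exact List.eq_nil_of_length_eq_zero this
    rw [if_neg h0, if_neg (fun he => hne he)]
    -- A's two peeling loops
    rw [pvALeadLoop_eq]
    rw [show t.dropWhile (· == '(') = (t.dropWhile (· == '(')).reverse.reverse from by simp]
    rw [pvATrailLoop_eq]
    simp only [List.nil_append]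
    set rest := t.dropWhile (· == '(') with hrestd
    -- B's paren counters
    have h_a : pvScanL (· == '(') l (l.length - k) i = i + (t.takeWhile (· == '(')).length := by
      rw [pvScanL_spec (· == '(') l ((l.length - k) - i) i (l.length - k) le_rfl (by omega)
        (Nat.sub_le _ _), hwin_t]
    rw [h_a]
    set La := (t.takeWhile (· == '(')).length with hLa
    have hLat : La ≤ t.length := hTWle _ t
    have hrestlen : rest.length = t.length - La := by
      rw [hrestd, dropWhile_eq_drop, ← hLa]
      simp
    have hwin_rest : (l.drop (i + La)).take ((l.length - k) - (i + La)) = rest := by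
      rw [winL, hwin_t, hrestd, dropWhile_eq_drop, ← hLa]
    have h_b : pvScanR (· == ')') l (i + La) (l.length - k)
        = (l.length - k) - (rest.reverse.takeWhile (· == ')')).length := by
      rw [pvScanR_spec (· == ')') l ((l.length - k) - (i + La)) (i + La) (l.length - k) le_rfl
        (by omega) (Nat.sub_le _ _), hwin_rest]
    rw [h_b]
    set Ltr := (rest.reverse.takeWhile (· == ')')).length with hLtr
    have hLtrr : Ltr ≤ rest.length := by
      have := hTWle (· == ')') rest.reverse
      simpa using this
    set inner := (rest.reverse.dropWhile (· == ')')).reverse with hinnerd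
    have hinner : inner = rest.take (rest.length - Ltr) := by
      rw [hinnerd, dropWhile_eq_drop, ← hLtr, rev_drop_rev]
    have hinnerlen : inner.length = rest.length - Ltr := by
      rw [hinner]
      simp
    have hwin_inner : (l.drop (i + La)).take (((l.length - k) - Ltr) - (i + La)) = inner := by
      rw [winR, hwin_rest,
        show ((l.length - k) - (i + La)) - Ltr = rest.length - Ltr from by omega, hinner]
    -- B's inner-whitespace loops
    have h_a2 : pvScanL PySem.Chars.isspace l ((l.length - k) - Ltr) (i + La)
        = (i + La) + (inner.takeWhile PySem.Chars.isspace).length := by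
      rw [pvScanL_spec PySem.Chars.isspace l (((l.length - k) - Ltr) - (i + La)) (i + La)
        ((l.length - k) - Ltr) le_rfl (by omega) (by omega), hwin_inner]
    rw [h_a2]
    set Lw := (inner.takeWhile PySem.Chars.isspace).length with hLw
    have hLwi : Lw ≤ inner.length := hTWle _ inner
    set m2 := inner.dropWhile PySem.Chars.isspace with hm2d
    have hm2len : m2.length = inner.length - Lw := by
      rw [hm2d, dropWhile_eq_drop, ← hLw]
      simp
    have hwin_m2 : (l.drop ((i + La) + Lw)).take (((l.length - k) - Ltr) - ((i + La) + Lw)) = m2 := by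
      rw [winL, hwin_inner, hm2d, dropWhile_eq_drop, ← hLw]
    have h_b2 : pvScanR PySem.Chars.isspace l ((i + La) + Lw) ((l.length - k) - Ltr)
        = ((l.length - k) - Ltr) - (m2.reverse.takeWhile PySem.Chars.isspace).length := by
      rw [pvScanR_spec PySem.Chars.isspace l (((l.length - k) - Ltr) - ((i + La) + Lw))
        ((i + La) + Lw) ((l.length - k) - Ltr) le_rfl (by omega) (by omega), hwin_m2]
    rw [h_b2]
    set k2 := (m2.reverse.takeWhile PySem.Chars.isspace).length with hk2
    have hk2m : k2 ≤ m2.length := by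
      have := hTWle PySem.Chars.isspace m2.reverse
      simpa using this
    have ht3' : PySem.Chars.strip inner = m2.take (m2.length - k2) := by
      show ((inner.dropWhile PySem.Chars.isspace).reverse.dropWhile PySem.Chars.isspace).reverse = _
      rw [← hm2d, dropWhile_eq_drop PySem.Chars.isspace m2.reverse, ← hk2, rev_drop_rev]
    set t3 := PySem.Chars.strip inner with ht3d
    have ht3len : t3.length = m2.length - k2 := by
      rw [ht3']
      simp
    -- the final slice term[a2:b2] is the double-stripped core
    have hwin_t3 : (l.take (((l.length - k) - Ltr) - k2)).drop ((i + La) + Lw) = t3 := by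
      rw [List.drop_take, winR, hwin_m2,
        show (((l.length - k) - Ltr) - ((i + La) + Lw)) - k2 = m2.length - k2 from by omega, ht3']
    rw [hwin_t3]
    -- the leading/trailing paren strings are replicates of the counted lengths
    have hlead : List.replicate ((i + La) - i) '(' = t.takeWhile (· == '(') := by
      rw [show (i + La) - i = La from by omega, hLa, ← takeWhile_eq_replicate]
    have htrail : List.replicate ((l.length - k) - ((l.length - k) - Ltr)) ')'
        = rest.reverse.takeWhile (· == ')') := by
      rw [show (l.length - k) - ((l.length - k) - Ltr) = Ltr from by omega, hLtr,
        ← takeWhile_eq_replicate]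
    rw [hlead, htrail]
    -- both branch conditions say: the double-stripped core is empty
    by_cases h3 : t3 = []
    · have h3l : t3.length = 0 := by rw [h3]; rfl
      rw [if_pos h3, if_pos (by omega)]
    · have h3l : t3.length ≠ 0 := fun hz => h3 (List.eq_nil_of_length_eq_zero hz)
      rw [if_neg h3, if_neg (fun he => h3l (by omega))]
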